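-- pv_equiv track=rewrite | github.com/gabka0/dynagox | dynagox_cpp/implement/benchmark/run_linek_set_oracle.py | fnv_hash
-- ===== SOURCE A (Python) =====
-- def fnv_hash(out_counts: dict[str, int]) -> int:
--     h = 1469598103934665603
--     for key in sorted(out_counts.keys()):
--         for c in key.encode("utf-8"):
--             h ^= c
--             h = (h * 1099511628211) & 0xFFFFFFFFFFFFFFFF
--         v = out_counts[key] & 0xFFFFFFFFFFFFFFFF
--         h ^= v
--         h = (h * 1099511628211) & 0xFFFFFFFFFFFFFFFF
--     return h
-- ===== SOURCE B (Python) =====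
-- def fnv_hash(out_counts: dict[str, int]) -> int:
--     # Selection-extraction instead of sort-then-scan: no sorted list is ever
--     # built; each round scans the remaining keys for the minimum, removes it,
--     # and hashes its bytes and masked value immediately.
--     remaining = list(out_counts)
--     h = 1469598103934665603
--     while remaining:
--         m = remaining[0]
--         for k in remaining:
--             if k < m:
--                 m = k
--         remaining.remove(m)
--         for c in m.encode("utf-8"):
--             h = ((h ^ c) * 1099511628211) & 0xFFFFFFFFFFFFFFFF
--         h = ((h ^ (out_counts[m] & 0xFFFFFFFFFFFFFFFF)) * 1099511628211) & 0xFFFFFFFFFFFFFFFF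
--     return h
-- ===== Notes on version B (the rewrite author's own statement) =====
-- stated objective: alternative
-- what changed: B never builds a sorted list: it does selection extraction, repeatedly scanning the remaining keys for the minimum, removing it and hashing its bytes and masked value immediately, instead of A's sorted()-then-iterate.
import Mathlib
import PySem

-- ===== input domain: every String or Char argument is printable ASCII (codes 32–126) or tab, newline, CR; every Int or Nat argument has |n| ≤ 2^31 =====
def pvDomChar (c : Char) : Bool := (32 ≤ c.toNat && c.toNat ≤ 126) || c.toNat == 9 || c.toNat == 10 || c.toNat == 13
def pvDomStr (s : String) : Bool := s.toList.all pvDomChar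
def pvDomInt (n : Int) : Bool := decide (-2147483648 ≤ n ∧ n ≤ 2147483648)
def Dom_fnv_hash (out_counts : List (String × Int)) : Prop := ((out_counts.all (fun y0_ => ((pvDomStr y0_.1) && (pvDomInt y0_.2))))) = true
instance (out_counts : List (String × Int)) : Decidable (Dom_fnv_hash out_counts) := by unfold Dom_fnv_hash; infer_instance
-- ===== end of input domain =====

-- ===== PORT A =====
-- B replaces sort-then-scan by selection extraction (repeatedly scan the remaining keys for
-- the minimum, remove it, hash it immediately); objective: alternative — no sorted list is
-- ever built; B is quadratic in the number of keys where A's sort is O(k log k).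
-- key.encode("utf-8") is ported as the char codes (exact on Dom: printable ASCII + tab/newline/CR, all single-byte).
-- dict keys() = distinct keys in insertion order; out_counts[key] = first match (association-list convention).
def fnv_hash (out_counts : List (String × Int)) : Int :=
  (PySem.List.sorted (PySem.List.dedup (out_counts.map Prod.fst)) (fun k => k) false).foldl
    (fun h key =>
      let h := key.toList.foldl
        (fun h c =>
          PySem.Int.band ((PySem.Int.bxor h ((c.toNat : Int))) * 1099511628211) 18446744073709551615) h
      let v := PySem.Int.band ((out_counts.lookup key).getD 0) 18446744073709551615
      PySem.Int.band ((PySem.Int.bxor h v) * 1099511628211) 18446744073709551615)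
    1469598103934665603

-- ===== PORT B =====
-- the inner scan of the while loop: m = remaining[0]; for k in remaining: if k < m: m = k
def pvScanMin (r0 : String) (rest : List String) : String :=
  rest.foldl (fun m k => if k < m then k else m) r0

-- termination helper: the scanned minimum is one of the remaining keys
theorem pvScanMin_mem (rest : List String) (r0 : String) : pvScanMin r0 rest ∈ r0 :: rest := by
  unfold pvScanMin
  induction rest generalizing r0 with
  | nil => simp [List.foldl]
  | cons k t ih =>
    simp only [List.foldl]
    have h := ih (if k < r0 then k else r0)
    by_cases hk : k < r0 <;> simp only [hk, if_true, if_false] at h ⊢ <;>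
      simp only [List.mem_cons] at h ⊢ <;> tauto

-- termination helper: removing a present element shortens the list
theorem pvEraseLt (l : List String) (m : String) (hm : m ∈ l) :
    (l.erase m).length < l.length := by
  have h1 := List.length_erase_of_mem hm
  have h2 : l ≠ [] := List.ne_nil_of_mem hm
  have h3 : 0 < l.length := List.length_pos_iff.mpr h2
  omega

-- the while loop: scan for the minimum remaining key, remove it, hash it, repeat
def fnv_hash_alt_go (out_counts : List (String × Int)) (remaining : List String) (h : Int) : Int :=
  match remaining with
  | [] => h
  | r0 :: rest =>
    let m := pvScanMin r0 rest
    let h := m.toList.foldl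
      (fun h c =>
        PySem.Int.band ((PySem.Int.bxor h ((c.toNat : Int))) * 1099511628211) 18446744073709551615) h
    let h := PySem.Int.band
      ((PySem.Int.bxor h (PySem.Int.band ((out_counts.lookup m).getD 0) 18446744073709551615))
        * 1099511628211) 18446744073709551615
    fnv_hash_alt_go out_counts ((r0 :: rest).erase m) h
termination_by remaining.length
decreasing_by
  exact pvEraseLt _ _ (pvScanMin_mem rest r0)

def fnv_hash_alt (out_counts : List (String × Int)) : Int :=
  fnv_hash_alt_go out_counts (PySem.List.dedup (out_counts.map Prod.fst)) 1469598103934665603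

-- ===== PRECONDITION & SPEC =====
def Spec_fnv_hash (out_counts : List (String × Int)) (out : Int) : Prop := out = fnv_hash_alt out_counts
instance (out_counts : List (String × Int)) (out : Int) : Decidable (Spec_fnv_hash out_counts out) := by unfold Spec_fnv_hash; infer_instance

-- ===== CLAIM (what is proved, stated in full; the proofs are below) =====
def Claim_equal_fnv_hash : Prop := ∀ (out_counts : List (String × Int)), Dom_fnv_hash out_counts → Spec_fnv_hash out_counts (fnv_hash out_counts)

-- ===== LEMMAS AND PROOFS =====

-- the scanned minimum is ≤ every remaining key
theorem pvScanMin_le (rest : List String) (r0 : String) :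
    ∀ x ∈ r0 :: rest, pvScanMin r0 rest ≤ x := by
  unfold pvScanMin
  induction rest generalizing r0 with
  | nil => intro x hx; simp at hx; simp [List.foldl, hx]
  | cons k t ih =>
    intro x hx
    simp only [List.foldl]
    simp only [List.mem_cons] at hx
    rcases hx with hx | hx | hx
    · -- x = r0
      rw [hx]
      by_cases hk : k < r0
      · simp only [if_pos hk]
        exact le_trans (ih k k (by simp)) (le_of_lt hk)
      · simp only [if_neg hk]
        exact ih r0 r0 (by simp)
    · -- x = k
      rw [hx]
      by_cases hk : k < r0
      · simp only [if_pos hk]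
        exact ih k k (by simp)
      · simp only [if_neg hk]
        exact le_trans (ih r0 r0 (by simp)) (le_of_not_gt hk)
    · by_cases hk : k < r0
      · simp only [if_pos hk]
        exact ih k x (by simp [hx])
      · simp only [if_neg hk]
        exact ih r0 x (by simp [hx])

-- selection step names the head of the sorted order
theorem pvSorted_cons_erase (l : List String) (m : String)
    (hnd : l.Nodup) (hmem : m ∈ l) (hle : ∀ x ∈ l, m ≤ x) :
    PySem.List.sorted l (fun k => k) false
      = m :: PySem.List.sorted (l.erase m) (fun k => k) false := by
  apply PySem.List.sorted_eq_of_perm_of_pairwise_lt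
  · exact (List.Perm.cons m (PySem.List.sorted_perm _ _ _)).trans
      (List.perm_cons_erase hmem).symm
  · constructor
    · intro y hy
      have hy' : y ∈ l.erase m := (PySem.List.mem_sorted _ _ _ _).1 hy
      have hyl : y ∈ l := List.mem_of_mem_erase hy'
      refine lt_of_le_of_ne (hle y hyl) ?_
      intro hEq
      exact (List.Nodup.not_mem_erase hnd) (hEq ▸ hy')
    · have hpl : (PySem.List.sorted (l.erase m) (fun k => k) false).Pairwise
          (fun a b => (fun k => k) a ≤ (fun k => k) b) :=
        PySem.List.sorted_pairwise _ _
      have hnd' : (PySem.List.sorted (l.erase m) (fun k => k) false).Nodup :=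
        (PySem.List.sorted_perm _ _ _).nodup_iff.mpr (List.Nodup.erase m hnd)
      have hne := List.nodup_iff_pairwise_ne.mp hnd'
      exact (hpl.and hne).imp (fun h => lt_of_le_of_ne h.1 h.2)

-- the selection loop equals A's fold over the sorted key list
theorem pvGo_eq (oc : List (String × Int)) :
    ∀ (n : Nat) (l : List String), l.length ≤ n → l.Nodup → ∀ (h : Int),
    fnv_hash_alt_go oc l h
      = (PySem.List.sorted l (fun k => k) false).foldl
          (fun h key =>
            let h := key.toList.foldl
              (fun h c =>
                PySem.Int.band ((PySem.Int.bxor h ((c.toNat : Int))) * 1099511628211) 18446744073709551615) h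
            let v := PySem.Int.band ((oc.lookup key).getD 0) 18446744073709551615
            PySem.Int.band ((PySem.Int.bxor h v) * 1099511628211) 18446744073709551615) h := by
  intro n
  induction n with
  | zero =>
    intro l hl _ h
    have : l = [] := List.eq_nil_of_length_eq_zero (Nat.le_zero.mp hl)
    subst this
    rw [fnv_hash_alt_go]
    rfl
  | succ n ih =>
    intro l hl hnd h
    match l with
    | [] => rw [fnv_hash_alt_go]; rfl
    | r0 :: rest =>
      have hm := pvScanMin_mem rest r0
      have hle := pvScanMin_le rest r0
      rw [fnv_hash_alt_go]
      dsimp only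
      rw [pvSorted_cons_erase _ _ hnd hm hle, List.foldl_cons]
      have hlen : ((r0 :: rest).erase (pvScanMin r0 rest)).length ≤ n := by
        have h1 := List.length_erase_of_mem hm
        have h2 : (r0 :: rest).length ≤ n + 1 := hl
        simp only [h1]
        simp only [List.length_cons] at h2 ⊢
        omega
      rw [ih _ hlen (List.Nodup.erase _ hnd)]

-- ===== VERDICT (by name: the statement is the Claim_ definition above) =====
theorem fnv_hash_spec : Claim_equal_fnv_hash := by
  intro out_counts _
  unfold Spec_fnv_hash fnv_hash fnv_hash_alt
  exact (pvGo_eq out_counts _ _ le_rfl (PySem.List.nodup_dedup _) _).symm
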